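-- pv_equiv track=rewrite | github.com/x0xolenok/Compiler-development-course | AlgoNon-terminals/main.py | find_unproductive_non_terminals
-- ===== SOURCE A (Python) =====
-- def find_unproductive_non_terminals(grammar):
--     productive_non_terminals = set()
--
--     # Iterate through all rules and collect productive non-terminals
--     for _ in range(len(grammar)):
--         for non_terminal, rules in grammar.items():
--             if non_terminal in productive_non_terminals:
--                 continue
--             if any(all(symbol in productive_non_terminals or symbol.islower() for symbol in rule) for rule in rules):
--                 productive_non_terminals.add(non_terminal)
--
--     return set(grammar.keys()) - productive_non_terminals
-- ===== SOURCE B (Python) =====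
-- def find_unproductive_non_terminals(grammar):
--     # Worklist with per-rule counters: index each symbol occurrence once, count
--     # the unresolved (non-lowercase, not-yet-productive) symbols of every rule,
--     # and propagate a non-terminal the moment one of its rules' counters hits 0.
--     counts = []        # counts[rid] = unresolved symbol occurrences in rule rid
--     lhs_of = []        # lhs_of[rid] = left-hand side of rule rid
--     occ = {}           # symbol -> rule ids, one entry per occurrence
--     productive = set()
--     queue = []
--     for lhs, rules in grammar.items():
--         for rule in rules:
--             rid = len(counts)
--             lhs_of.append(lhs)
--             cnt = 0
--             for s in rule:
--                 if not s.islower():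
--                     cnt += 1
--                     occ.setdefault(s, []).append(rid)
--             counts.append(cnt)
--             if cnt == 0 and lhs not in productive:
--                 productive.add(lhs)
--                 queue.append(lhs)
--     i = 0
--     while i < len(queue):
--         n = queue[i]
--         i += 1
--         for rid in occ.get(n, []):
--             counts[rid] -= 1
--             if counts[rid] == 0 and lhs_of[rid] not in productive:
--                 productive.add(lhs_of[rid])
--                 queue.append(lhs_of[rid])
--     return {k for k in grammar if k not in productive}
-- ===== Notes on version B (the rewrite author's own statement) =====
-- stated objective: faster
-- what changed: A repeats len(grammar) full passes re-testing every rule against the current productive set; B builds a per-rule counter of unresolved symbols plus an occurrence index symbol->rule ids once, then propagates each newly productive non-terminal through a FIFO worklist, decrementing only the rules that mention it, so no rule is ever re-scanned.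
import Mathlib
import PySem

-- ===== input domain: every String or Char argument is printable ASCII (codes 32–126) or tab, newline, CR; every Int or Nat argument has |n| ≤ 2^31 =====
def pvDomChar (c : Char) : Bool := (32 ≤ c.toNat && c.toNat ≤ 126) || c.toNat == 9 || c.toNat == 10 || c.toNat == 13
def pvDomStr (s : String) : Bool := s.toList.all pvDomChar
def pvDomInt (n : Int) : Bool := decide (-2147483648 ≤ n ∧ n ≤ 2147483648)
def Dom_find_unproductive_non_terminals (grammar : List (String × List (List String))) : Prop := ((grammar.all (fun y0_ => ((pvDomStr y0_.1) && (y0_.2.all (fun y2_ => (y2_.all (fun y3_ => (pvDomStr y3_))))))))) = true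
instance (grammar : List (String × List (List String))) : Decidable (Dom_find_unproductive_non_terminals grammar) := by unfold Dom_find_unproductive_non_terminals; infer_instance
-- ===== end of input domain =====

-- B replaces A's len(grammar) blind re-scanning passes by a one-shot per-rule counter of
-- unresolved symbols plus an occurrence index and a FIFO worklist that decrements only the
-- rules mentioning each newly productive non-terminal (objective: faster).


-- ===== PORT A =====
-- str.islower() ported by hand (PySem has only the Char-level predicates): on the ASCII
-- domain of Dom_ a string is .islower() iff it has an alphabetic (= cased) character and
-- no uppercase character; exact for printable-ASCII strings.
def pvIslower (s : String) : Bool :=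
  s.toList.any PySem.Chars.isalpha && s.toList.all (fun c => !(PySem.Chars.isupper c))

-- 'any(all(symbol in productive or symbol.islower() for symbol in rule) for rule in rules)'
def pvOk (S : PySem.Set String) (rules : List (List String)) : Bool :=
  rules.any (fun rule => rule.all (fun symbol => PySem.Set.contains S symbol || pvIslower symbol))

-- body of A's inner 'for non_terminal, rules in grammar.items():' loop
def pvStepA (S : PySem.Set String) (p : String × List (List String)) : PySem.Set String :=
  if PySem.Set.contains S p.1 then S
  else if pvOk S p.2 then PySem.Set.add S p.1 else S

def pvPassA (grammar : List (String × List (List String))) (S : PySem.Set String) : PySem.Set String :=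
  grammar.foldl pvStepA S

def find_unproductive_non_terminals (grammar : List (String × List (List String))) : List String :=
  let productive := (List.range grammar.length).foldl (fun S _ => pvPassA grammar S) PySem.Set.empty
  PySem.Set.diff (PySem.Set.ofList (grammar.map Prod.fst)) productive

-- ===== PORT B =====
-- B's mutable build/worklist state: lhs_of, counts, occ, productive, queue
structure PVB where
  lhsOf : List String
  counts : List Int
  occ : PySem.Dict String (List Nat)
  prod : PySem.Set String
  queue : List String

-- body of B's 'for s in rule:' loop (cnt += 1; occ.setdefault(s, []).append(rid))
def pvScanSym (rid : Nat) (st : Int × PySem.Dict String (List Nat)) (s : String) :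
    Int × PySem.Dict String (List Nat) :=
  if pvIslower s then st else (st.1 + 1, st.2.modify s [] (· ++ [rid]))

-- body of B's 'for rule in rules:' loop
def pvAddRule (lhs : String) (st : PVB) (rule : List String) : PVB :=
  let rid := st.counts.length
  let sc := rule.foldl (pvScanSym rid) (0, st.occ)
  if sc.1 == 0 && !(PySem.Set.contains st.prod lhs) then
    ⟨st.lhsOf ++ [lhs], st.counts ++ [sc.1], sc.2, PySem.Set.add st.prod lhs, st.queue ++ [lhs]⟩
  else
    ⟨st.lhsOf ++ [lhs], st.counts ++ [sc.1], sc.2, st.prod, st.queue⟩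

-- B's first loop nest: build counters, occurrence index and the initial queue
def pvBuild (g : List (String × List (List String))) : PVB :=
  g.foldl (fun st p => p.2.foldl (pvAddRule p.1) st) ⟨[], [], PySem.Dict.empty, PySem.Set.empty, []⟩

-- body of B's 'for rid in occ.get(n, []):' loop (counts[rid] -= 1; propagate on 0)
def pvRelax (lhsOf : List String) (st : List Int × PySem.Set String × List String) (rid : Nat) :
    List Int × PySem.Set String × List String :=
  let c := st.1.getD rid 0 - 1
  let counts := st.1.set rid c
  let lhs := lhsOf.getD rid ""
  if c == 0 && !(PySem.Set.contains st.2.1 lhs) then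
    (counts, PySem.Set.add st.2.1 lhs, st.2.2 ++ [lhs])
  else (counts, st.2.1, st.2.2)

-- B's 'while i < len(queue):' worklist, the unprocessed suffix as a list; the fuel argument
-- only makes the recursion total (proved sufficient below: it is never exhausted under Pre_)
def pvLoopW (lhsOf : List String) (occ : PySem.Dict String (List Nat)) :
    Nat → List Int → PySem.Set String → List String → PySem.Set String
  | 0, _, S, _ => S
  | _ + 1, _, S, [] => S
  | fuel + 1, counts, S, n :: rest =>
    let r := (occ.getD n []).foldl (pvRelax lhsOf) (counts, S, [])
    pvLoopW lhsOf occ fuel r.1 r.2.1 (rest ++ r.2.2)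

def find_unproductive_non_terminals_alt (grammar : List (String × List (List String))) : List String :=
  let st := pvBuild grammar
  let productive := pvLoopW st.lhsOf st.occ (grammar.length + st.queue.length) st.counts st.prod st.queue
  PySem.Set.ofList ((grammar.map Prod.fst).filter (fun k => !(PySem.Set.contains productive k)))

-- ===== PRECONDITION & SPEC =====
-- Pre_ restricts the association list to pairwise-distinct keys: the argument stands for a
-- Python dict, which cannot hold two entries with the same key.
def Pre_find_unproductive_non_terminals (grammar : List (String × List (List String))) : Prop :=
  (grammar.map Prod.fst).Nodup
instance (grammar : List (String × List (List String))) : Decidable (Pre_find_unproductive_non_terminals grammar) := by unfold Pre_find_unproductive_non_terminals; infer_instance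

def pvWitness_find_unproductive_non_terminals : (List (String × List (List String))) :=
  [("S", [["a", "B"], ["b"]]), ("B", [["B"]]), ("C", [["S", "c"]])]

def Spec_find_unproductive_non_terminals (grammar : List (String × List (List String))) (out : List String) : Prop := out = find_unproductive_non_terminals_alt grammar
instance (grammar : List (String × List (List String))) (out : List String) : Decidable (Spec_find_unproductive_non_terminals grammar out) := by unfold Spec_find_unproductive_non_terminals; infer_instance

-- ===== CLAIM (what is proved, stated in full; the proofs are below) =====
def Claim_equal_find_unproductive_non_terminals : Prop := ∀ (grammar : List (String × List (List String))), Dom_find_unproductive_non_terminals grammar → Pre_find_unproductive_non_terminals grammar → Spec_find_unproductive_non_terminals grammar (find_unproductive_non_terminals grammar)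

-- ===== LEMMAS AND PROOFS =====

-- a set of non-terminal names closed under the grammar's one-step productivity rule
def pvClosed (g : List (String × List (List String))) (T : PySem.Set String) : Prop :=
  ∀ p ∈ g, pvOk T p.2 = true → p.1 ∈ T

theorem pvOk_mono {S T : PySem.Set String} (hST : ∀ x ∈ S, x ∈ T) {rules : List (List String)}
    (h : pvOk S rules = true) : pvOk T rules = true := by
  simp only [pvOk, List.any_eq_true, List.all_eq_true] at h ⊢
  obtain ⟨rule, hr, hall⟩ := h
  refine ⟨rule, hr, fun s hs => ?_⟩
  rcases Bool.or_eq_true _ _ |>.mp (hall s hs) with hc | hl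
  · have hsS : s ∈ S := by simpa [PySem.Set.contains] using hc
    have hsT : s ∈ T := hST s hsS
    simp [PySem.Set.contains, hsT]
  · simp [hl]

theorem pvStepA_ext (S : PySem.Set String) (p : String × List (List String)) :
    pvStepA S p = S ∨ pvStepA S p = S ++ [p.1] := by
  unfold pvStepA PySem.Set.add
  split
  · exact Or.inl rfl
  · split
    · simp_all
    · exact Or.inl rfl

theorem pvFoldA_ext (l : List (String × List (List String))) (S : PySem.Set String) :
    ∃ d, l.foldl pvStepA S = S ++ d := by
  induction l generalizing S with
  | nil => exact ⟨[], by simp⟩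
  | cons p l ih =>
    rcases pvStepA_ext S p with h | h <;> rw [List.foldl_cons, h]
    · exact ih S
    · obtain ⟨d, hd⟩ := ih (S ++ [p.1])
      exact ⟨[p.1] ++ d, by simp [hd]⟩

theorem pvFoldA_subset (l : List (String × List (List String))) (S : PySem.Set String) :
    ∀ x ∈ S, x ∈ l.foldl pvStepA S := by
  obtain ⟨d, hd⟩ := pvFoldA_ext l S
  intro x hx; rw [hd]; exact List.mem_append_left _ hx

theorem pvFoldA_mem (l : List (String × List (List String))) (S : PySem.Set String)
    (p : String × List (List String)) (hp : p ∈ l) (h : p.1 ∈ S ∨ pvOk S p.2 = true) :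
    p.1 ∈ l.foldl pvStepA S := by
  induction l generalizing S with
  | nil => cases hp
  | cons q l ih =>
    rw [List.foldl_cons]
    have hsub : ∀ x ∈ S, x ∈ pvStepA S q := by
      rcases pvStepA_ext S q with h' | h' <;> rw [h'] <;> intro x hx
      · exact hx
      · exact List.mem_append_left _ hx
    rcases List.mem_cons.mp hp with rfl | hpl
    · -- head
      rcases h with hS | hOk
      · exact pvFoldA_subset l _ _ (hsub _ hS)
      · have : p.1 ∈ pvStepA S p := by
          unfold pvStepA
          split
          · rename_i hc; simpa [PySem.Set.contains] using hc
          · exact (PySem.Set.mem_add S p.1 p.1).mpr (Or.inr rfl)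
        exact pvFoldA_subset l _ _ this
    · exact ih _ hpl (h.imp (hsub _) (pvOk_mono hsub))

theorem pvFoldA_id (l : List (String × List (List String))) (S : PySem.Set String)
    (h : ∀ p ∈ l, p.1 ∈ S) : l.foldl pvStepA S = S := by
  induction l with
  | nil => rfl
  | cons p l ih =>
    have hc : PySem.Set.contains S p.1 = true := by
      simpa [PySem.Set.contains] using h p (List.mem_cons_self)
    rw [List.foldl_cons, pvStepA, if_pos hc]
    exact ih (fun q hq => h q (List.mem_cons_of_mem _ hq))

theorem pvFoldA_nodup (l : List (String × List (List String))) (S : PySem.Set String)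
    (h : S.Nodup) : (l.foldl pvStepA S).Nodup := by
  induction l generalizing S with
  | nil => exact h
  | cons p l ih =>
    rw [List.foldl_cons]
    refine ih _ ?_
    unfold pvStepA PySem.Set.add
    split
    · exact h
    · split
      · rename_i hc _
        have hnin : p.1 ∉ S := by simpa [PySem.Set.contains] using hc
        exact List.Nodup.append h (List.nodup_singleton _)
          (by simpa [List.disjoint_singleton] using hnin)
      · exact h

theorem pvFoldA_bound (l : List (String × List (List String))) (S : PySem.Set String) :
    ∀ x ∈ l.foldl pvStepA S, x ∈ S ∨ x ∈ l.map Prod.fst := by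
  induction l generalizing S with
  | nil => intro x hx; exact Or.inl hx
  | cons p l ih =>
    intro x hx
    rw [List.foldl_cons] at hx
    rcases ih _ x hx with hx' | hx'
    · rcases pvStepA_ext S p with h' | h' <;> rw [h'] at hx'
      · exact Or.inl hx'
      · rcases List.mem_append.mp hx' with h2 | h2
        · exact Or.inl h2
        · exact Or.inr (by simp_all)
    · exact Or.inr (by simp [hx'])

theorem pvFoldA_min (g l : List (String × List (List String))) (T S : PySem.Set String)
    (hcl : pvClosed g T) (hl : ∀ p ∈ l, p ∈ g) (hS : ∀ x ∈ S, x ∈ T) :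
    ∀ x ∈ l.foldl pvStepA S, x ∈ T := by
  induction l generalizing S with
  | nil => exact hS
  | cons p l ih =>
    rw [List.foldl_cons]
    refine ih _ (fun q hq => hl q (List.mem_cons_of_mem _ hq)) ?_
    intro x hx
    unfold pvStepA at hx
    split at hx
    · exact hS x hx
    · split at hx
      · rename_i hOk
        rcases (PySem.Set.mem_add S p.1 x).mp hx with hxS | rfl
        · exact hS x hxS
        · exact hcl p (hl p List.mem_cons_self) (pvOk_mono hS hOk)
      · exact hS x hx

theorem pvRange_foldl_eq_iterate {α : Type} (f : α → α) (a : α) (n : Nat) :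
    (List.range n).foldl (fun S _ => f S) a = f^[n] a := by
  induction n with
  | zero => rfl
  | succ n ih => rw [List.range_succ, List.foldl_append, ih, Function.iterate_succ_apply']; rfl

theorem pvIter_bound (g : List (String × List (List String))) (n : Nat) :
    ∀ x ∈ (pvPassA g)^[n] ([] : PySem.Set String), x ∈ g.map Prod.fst := by
  induction n with
  | zero => simp
  | succ n ih =>
    rw [Function.iterate_succ_apply']
    intro x hx
    rcases pvFoldA_bound g _ x hx with h | h
    · exact ih x h
    · exact h

theorem pvIter_nodup (g : List (String × List (List String))) (n : Nat) :
    ((pvPassA g)^[n] ([] : PySem.Set String)).Nodup := by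
  induction n with
  | zero => simp
  | succ n ih => rw [Function.iterate_succ_apply']; exact pvFoldA_nodup g _ ih

theorem pvIter_fix (g : List (String × List (List String))) :
    pvPassA g ((pvPassA g)^[g.length] ([] : PySem.Set String)) = (pvPassA g)^[g.length] [] := by
  by_cases h : ∃ k, k < g.length ∧ pvPassA g ((pvPassA g)^[k] ([] : PySem.Set String)) = (pvPassA g)^[k] []
  · obtain ⟨k, hklt, hfix⟩ := h
    have hstab : ∀ m, (pvPassA g)^[m] ((pvPassA g)^[k] ([] : PySem.Set String)) = (pvPassA g)^[k] [] :=
      fun m => Function.iterate_fixed hfix m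
    have hn : (pvPassA g)^[g.length] ([] : PySem.Set String) = (pvPassA g)^[k] [] := by
      have h2 := Function.iterate_add_apply (pvPassA g) (g.length - k) k ([] : PySem.Set String)
      rw [Nat.sub_add_cancel hklt.le] at h2
      rw [h2, hstab]
    rw [hn, hfix]
  · push Not at h
    have grow : ∀ k, k < g.length →
        ((pvPassA g)^[k] ([] : PySem.Set String)).length + 1 ≤ ((pvPassA g)^[k+1] []).length := by
      intro k hklt
      have hne := h k hklt
      rw [Function.iterate_succ_apply']
      obtain ⟨d, hd⟩ := pvFoldA_ext g ((pvPassA g)^[k] [])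
      have hd' : pvPassA g ((pvPassA g)^[k] ([] : PySem.Set String)) = (pvPassA g)^[k] [] ++ d := hd
      cases d with
      | nil => exact absurd (by simpa using hd') hne
      | cons a d => rw [hd']; simp
    have hlen : ∀ k, k ≤ g.length → k ≤ ((pvPassA g)^[k] ([] : PySem.Set String)).length := by
      intro k
      induction k with
      | zero => simp
      | succ k ih =>
        intro hk1
        have h1 := grow k (by omega)
        have h2 := ih (by omega)
        omega
    have hsub : ((pvPassA g)^[g.length] ([] : PySem.Set String)) ⊆ g.map Prod.fst :=
      fun x hx => pvIter_bound g _ x hx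
    have hsp := (pvIter_nodup g g.length).subperm hsub
    have hperm := hsp.perm_of_length_le (by simpa using hlen g.length le_rfl)
    refine pvFoldA_id g _ (fun p hp => ?_)
    exact (hperm.mem_iff).mpr (List.mem_map_of_mem hp)

-- the productive set of A's iterated passes stays inside any closed set
theorem pvIter_min (g : List (String × List (List String))) (T : PySem.Set String)
    (hcl : pvClosed g T) (m : Nat) : ∀ x ∈ (pvPassA g)^[m] ([] : PySem.Set String), x ∈ T := by
  induction m with
  | zero => simp
  | succ m ih =>
    rw [Function.iterate_succ_apply']
    exact pvFoldA_min g g T _ hcl (fun p hp => hp) ih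

-- ----- B-side ground truth -----

-- the grammar flattened into its individual (lhs, rule) pairs, rid = position
def pvRules (g : List (String × List (List String))) : List (String × List String) :=
  g.flatMap (fun p => p.2.map (fun r => (p.1, r)))

def pvRuleAt (g : List (String × List (List String))) (rid : Nat) : String × List String :=
  (pvRules g).getD rid ("", [])

-- the symbols of a rule that islower() does not resolve
def pvFilt (rule : List String) : List String := rule.filter (fun x => !pvIslower x)

-- number of occurrences in rule of symbols neither islower() nor already popped
def pvUnres (P : List String) (rule : List String) : Nat :=
  ((pvFilt rule).filter (fun x => !(decide (x ∈ P)))).length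

-- counts[] matches the unresolved-occurrence counts w.r.t. the popped list P
def pvCountsOK (g : List (String × List (List String))) (P : List String) (counts : List Int) : Prop :=
  counts.length = (pvRules g).length ∧
  ∀ rid, rid < (pvRules g).length → counts.getD rid 0 = (pvUnres P (pvRuleAt g rid).2 : Int)

-- occ[] holds, per symbol, each rule id once per occurrence
def pvOccOK (g : List (String × List (List String))) (occ : PySem.Dict String (List Nat)) : Prop :=
  ∀ s rid, ((occ.getD s []).count rid) = (pvFilt (pvRuleAt g rid).2).count s

-- a rule whose counter reached 0 has its lhs recorded productive
def pvZeroOK (g : List (String × List (List String))) (counts : List Int) (S : List String) : Prop :=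
  ∀ rid, rid < (pvRules g).length → counts.getD rid 0 = 0 → (pvRuleAt g rid).1 ∈ S

-- build-state invariant over the processed prefix rs of pvRules g
def pvBState (rs : List (String × List String)) (st : PVB) : Prop :=
  st.lhsOf = rs.map Prod.fst ∧
  st.counts.length = rs.length ∧
  (∀ rid, rid < rs.length → st.counts.getD rid 0 = ((pvFilt (rs.getD rid ("", [])).2).length : Int)) ∧
  (∀ s rid, ((st.occ.getD s []).count rid) = (pvFilt ((rs.getD rid ("", [])).2)).count s) ∧
  st.prod = st.queue ∧ st.prod.Nodup ∧
  (∀ x ∈ st.prod, ∃ rid, rid < rs.length ∧ x = (rs.getD rid ("", [])).1 ∧ pvFilt (rs.getD rid ("", [])).2 = []) ∧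
  (∀ rid, rid < rs.length → st.counts.getD rid 0 = 0 → (rs.getD rid ("", [])).1 ∈ st.prod)

theorem pvGetD_append_left {α : Type} (l l' : List α) (d : α) (n : Nat) (h : n < l.length) :
    (l ++ l').getD n d = l.getD n d := by
  simp [List.getD_eq_getElem?_getD, List.getElem?_append_left h]

theorem pvGetD_append_last {α : Type} (l : List α) (a d : α) :
    (l ++ [a]).getD l.length d = a := by
  simp [List.getD_eq_getElem?_getD]

theorem pvGetD_big {α : Type} (l : List α) (d : α) (n : Nat) (h : l.length ≤ n) :
    l.getD n d = d := by
  simp [List.getD_eq_getElem?_getD, List.getElem?_eq_none h]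

theorem pvGetD_set_self (l : List Int) (i : Nat) (a : Int) (h : i < l.length) :
    (l.set i a).getD i 0 = a := by
  simp [List.getD_eq_getElem?_getD, h]

theorem pvGetD_set_ne (l : List Int) (i j : Nat) (a : Int) (h : j ≠ i) :
    (l.set i a).getD j 0 = l.getD j 0 := by
  simp [List.getD_eq_getElem?_getD, List.getElem?_set_ne (by omega : i ≠ j)]

theorem pvGetD_map_fst (rs : List (String × List String)) (i : Nat) :
    (rs.map Prod.fst).getD i "" = (rs.getD i ("", [])).1 := by
  by_cases h : i < rs.length
  · simp [List.getD_eq_getElem?_getD, List.getElem?_eq_getElem h,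
      List.getElem?_eq_getElem (by simpa using h : i < (rs.map Prod.fst).length)]
  · rw [pvGetD_big _ _ _ (by simpa using not_lt.mp h), pvGetD_big _ _ _ (not_lt.mp h)]

theorem pvFilt_cons (s : String) (r : List String) :
    pvFilt (s :: r) = if pvIslower s then pvFilt r else s :: pvFilt r := by
  by_cases h : pvIslower s <;> simp [pvFilt, h]

theorem pvScanFold (rid : Nat) (rule : List String) :
    ∀ (c : Int) (occ : PySem.Dict String (List Nat)),
    (rule.foldl (pvScanSym rid) (c, occ)).1 = c + ((pvFilt rule).length : Int) ∧
    ∀ s r', (((rule.foldl (pvScanSym rid) (c, occ)).2.getD s []).count r') =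
      (occ.getD s []).count r' + (if r' = rid then (pvFilt rule).count s else 0) := by
  induction rule with
  | nil => intro c occ; simp [pvFilt]
  | cons s0 rule ih =>
    intro c occ
    by_cases h : pvIslower s0 = true
    · rw [List.foldl_cons, show pvScanSym rid (c, occ) s0 = (c, occ) from by simp [pvScanSym, h]]
      obtain ⟨ih1, ih2⟩ := ih c occ
      refine ⟨by rw [ih1, pvFilt_cons, if_pos h], fun s r' => ?_⟩
      rw [ih2 s r', pvFilt_cons, if_pos h]
    · rw [List.foldl_cons, show pvScanSym rid (c, occ) s0 =
        (c + 1, occ.modify s0 [] (· ++ [rid])) from by simp [pvScanSym, h]]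
      obtain ⟨ih1, ih2⟩ := ih (c + 1) (occ.modify s0 [] (· ++ [rid]))
      constructor
      · rw [ih1, pvFilt_cons, if_neg h]; simp only [List.length_cons]; push_cast; ring
      · intro s r'
        rw [ih2 s r']
        have hocc : ((occ.modify s0 [] (· ++ [rid])).getD s []) =
            if s = s0 then occ.getD s0 [] ++ [rid] else occ.getD s [] :=
          PySem.Dict.getD_modify occ s0 s [] _
      
        rw [pvFilt_cons, if_neg h]
        by_cases hs : s = s0
        · subst hs
          rw [hocc, if_pos rfl, List.count_append]
          by_cases hr : r' = rid <;>
            simp [hr, List.count_cons] <;> omega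
        · rw [hocc, if_neg hs]
          by_cases hr : r' = rid <;>
            simp [hr, Ne.symm hs]

theorem pvAddRule_state (rs : List (String × List String)) (st : PVB) (lhs : String)
    (rule : List String) (h : pvBState rs st) :
    pvBState (rs ++ [(lhs, rule)]) (pvAddRule lhs st rule) := by
  obtain ⟨hlhs, hlen, hcnt, hocc, hpq, hnd, hjust, hzero⟩ := h
  obtain ⟨hsc1, hsc2⟩ := pvScanFold st.counts.length rule 0 st.occ
  rw [zero_add] at hsc1
  unfold pvAddRule
  set sc := rule.foldl (pvScanSym st.counts.length) (0, st.occ) with hscdef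
  have hgetc : (st.counts ++ [sc.1]).getD rs.length 0 = sc.1 := by
    rw [← hlen]; exact pvGetD_append_last _ _ _
  have hL : st.lhsOf ++ [lhs] = (rs ++ [(lhs, rule)]).map Prod.fst := by simp [hlhs]
  have hlen' : (st.counts ++ [sc.1]).length = (rs ++ [(lhs, rule)]).length := by simp [hlen]
  have hcnt' : ∀ rid, rid < (rs ++ [(lhs, rule)]).length →
      (st.counts ++ [sc.1]).getD rid 0 = ((pvFilt ((rs ++ [(lhs, rule)]).getD rid ("", [])).2).length : Int) := by
    intro rid hrid
    have hrid1 : rid < rs.length + 1 := by simpa using hrid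
    rcases Nat.lt_or_ge rid rs.length with hlt | hge
    · rw [pvGetD_append_left _ _ _ _ (by omega), pvGetD_append_left _ _ _ _ hlt]
      exact hcnt rid hlt
    · have hr' : rid = rs.length := by omega
      subst hr'
      rw [hgetc, pvGetD_append_last, hsc1]
  have hocc' : ∀ s rid, ((sc.2.getD s []).count rid) =
      (pvFilt (((rs ++ [(lhs, rule)]).getD rid ("", [])).2)).count s := by
    intro s rid
    rw [hsc2 s rid, hocc s rid]
    rcases Nat.lt_or_ge rid rs.length with hlt | hge
    · rw [pvGetD_append_left _ _ _ _ hlt, if_neg (by omega)]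
      omega
    · rcases Nat.eq_or_lt_of_le hge with heq | hlt2
      · subst heq
        rw [pvGetD_big rs _ _ le_rfl, pvGetD_append_last, if_pos hlen.symm]
        simp [pvFilt]
      · rw [pvGetD_big rs _ _ hge, pvGetD_big (rs ++ [(lhs, rule)]) _ _ (by simp; omega),
          if_neg (by omega)]
        simp [pvFilt]
  have hjust0 : ∀ x ∈ st.prod, ∃ rid, rid < (rs ++ [(lhs, rule)]).length ∧
      x = ((rs ++ [(lhs, rule)]).getD rid ("", [])).1 ∧
      pvFilt ((rs ++ [(lhs, rule)]).getD rid ("", [])).2 = [] := by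
    intro x hx
    obtain ⟨rid, hrid, hx1, hx2⟩ := hjust x hx
    exact ⟨rid, by simp; omega, by rwa [pvGetD_append_left _ _ _ _ hrid],
      by rwa [pvGetD_append_left _ _ _ _ hrid]⟩
  by_cases hbr : (sc.1 == 0 && !(PySem.Set.contains st.prod lhs)) = true
  · rw [if_pos hbr]
    obtain ⟨hz, hnm⟩ := Bool.and_eq_true _ _ |>.mp hbr
    have hz' : sc.1 = 0 := by simpa using hz
    have hnm' : lhs ∉ st.prod := by simpa [PySem.Set.contains] using hnm
    have hfe : pvFilt rule = [] := by
      rw [hz'] at hsc1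
      exact List.length_eq_zero_iff.mp (by exact_mod_cast hsc1.symm)
    refine ⟨hL, hlen', hcnt', hocc', ?_, ?_, ?_, ?_⟩
    · show PySem.Set.add st.prod lhs = st.queue ++ [lhs]
      rw [PySem.Set.add_of_not_mem hnm', hpq]
    · exact PySem.Set.nodup_add st.prod lhs hnd
    · intro x hx
      rcases (PySem.Set.mem_add st.prod lhs x).mp (by simpa using hx) with hx' | rfl
      · exact hjust0 x hx'
      · exact ⟨rs.length, by simp, by rw [pvGetD_append_last], by rw [pvGetD_append_last]; exact hfe⟩
    · intro rid hrid hz2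
      show ((rs ++ [(lhs, rule)]).getD rid ("", [])).1 ∈ PySem.Set.add st.prod lhs
      have hz3 : (st.counts ++ [sc.1]).getD rid 0 = 0 := hz2
      have hrid1 : rid < rs.length + 1 := by simpa using hrid
      rcases Nat.lt_or_ge rid rs.length with hlt | hge
      · rw [pvGetD_append_left _ _ _ _ hlt]
        rw [pvGetD_append_left _ _ _ _ (by omega)] at hz3
        exact (PySem.Set.mem_add st.prod lhs _).mpr (Or.inl (hzero rid hlt hz3))
      · have hr' : rid = rs.length := by omega
        subst hr'
        rw [pvGetD_append_last]
        exact (PySem.Set.mem_add st.prod lhs _).mpr (Or.inr rfl)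
  · rw [if_neg hbr]
    refine ⟨hL, hlen', hcnt', hocc', hpq, hnd, hjust0, ?_⟩
    intro rid hrid hz2
    show ((rs ++ [(lhs, rule)]).getD rid ("", [])).1 ∈ st.prod
    have hz3 : (st.counts ++ [sc.1]).getD rid 0 = 0 := hz2
    have hrid1 : rid < rs.length + 1 := by simpa using hrid
    rcases Nat.lt_or_ge rid rs.length with hlt | hge
    · rw [pvGetD_append_left _ _ _ _ hlt]
      rw [pvGetD_append_left _ _ _ _ (by omega)] at hz3
      exact hzero rid hlt hz3
    · have hr' : rid = rs.length := by omega
      subst hr'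
      rw [pvGetD_append_last]
      rw [hgetc] at hz3
      -- counter 0 but the branch was not taken: lhs must already be productive
      have hmem : lhs ∈ st.prod := by
        by_contra hnm
        exact hbr (by simp [hz3, PySem.Set.contains, hnm])
      exact hmem

theorem pvBuild_eq_flat (g : List (String × List (List String))) : ∀ (init : PVB),
    g.foldl (fun st p => p.2.foldl (pvAddRule p.1) st) init
      = (pvRules g).foldl (fun st q => pvAddRule q.1 st q.2) init := by
  induction g with
  | nil => intro init; rfl
  | cons p g ih =>
    intro init
    rw [List.foldl_cons, ih, show pvRules (p :: g) = p.2.map (fun r => (p.1, r)) ++ pvRules g from by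
      simp [pvRules], List.foldl_append, List.foldl_map]

theorem pvBState_foldl (rs : List (String × List String)) :
    pvBState rs (rs.foldl (fun st q => pvAddRule q.1 st q.2)
      ⟨[], [], PySem.Dict.empty, PySem.Set.empty, []⟩) := by
  induction rs using List.reverseRecOn with
  | nil =>
    refine ⟨rfl, rfl, by simp, ?_, rfl, List.nodup_nil, by simp [PySem.Set.empty], by simp⟩
    intro s rid
    simp [PySem.Dict.getD_empty, pvFilt]
  | append_singleton rs q ih =>
    rw [List.foldl_append, List.foldl_cons, List.foldl_nil]
    exact pvAddRule_state rs _ q.1 q.2 ih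

theorem pvBuild_state (g : List (String × List (List String))) : pvBState (pvRules g) (pvBuild g) := by
  rw [show pvBuild g = (pvRules g).foldl (fun st q => pvAddRule q.1 st q.2)
    ⟨[], [], PySem.Dict.empty, PySem.Set.empty, []⟩ from pvBuild_eq_flat g _]
  exact pvBState_foldl (pvRules g)

theorem pvUnres_nil (r : List String) : pvUnres [] r = (pvFilt r).length := by
  simp [pvUnres]

theorem pvUnres_eq_zero_iff (P r : List String) :
    pvUnres P r = 0 ↔ ∀ x ∈ pvFilt r, x ∈ P := by
  simp [pvUnres, List.length_eq_zero_iff, List.filter_eq_nil_iff]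

theorem pvUnres_append (P r : List String) (n : String) (hn : n ∉ P) :
    pvUnres P r = pvUnres (P ++ [n]) r + (pvFilt r).count n := by
  unfold pvUnres
  induction pvFilt r with
  | nil => simp
  | cons a m ih =>
    by_cases ha : a = n
    · subst ha
      simp only [List.filter_cons, List.count_cons, List.mem_append, List.mem_singleton]
      simp [hn, ih]
      omega
    · simp only [List.filter_cons, List.count_cons, List.mem_append, List.mem_singleton]
      by_cases hP : a ∈ P
      · simp [hP, ha, ih]
      · simp [hP, ha, ih]
        omega

theorem pvRuleAt_mem (g : List (String × List (List String))) (rid : Nat)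
    (h : rid < (pvRules g).length) : pvRuleAt g rid ∈ pvRules g := by
  unfold pvRuleAt
  rw [List.getD_eq_getElem?_getD, List.getElem?_eq_getElem h]
  exact List.getElem_mem h

theorem pvRuleAt_fst_mem (g : List (String × List (List String))) (rid : Nat)
    (h : rid < (pvRules g).length) : (pvRuleAt g rid).1 ∈ (pvRules g).map Prod.fst :=
  List.mem_map_of_mem (pvRuleAt_mem g rid h)

theorem pvRules_fst_sub (g : List (String × List (List String))) :
    ∀ x ∈ (pvRules g).map Prod.fst, x ∈ g.map Prod.fst := by
  intro x hx
  simp only [pvRules, List.map_flatMap, List.mem_flatMap] at hx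
  obtain ⟨p, hp, hx'⟩ := hx
  simp only [List.map_map, List.mem_map] at hx'
  obtain ⟨r, _, rfl⟩ := hx'
  exact List.mem_map_of_mem hp

-- the per-rule form of closedness, from the entry-level form used on the A side
theorem pvClosedR_of_closed (g : List (String × List (List String))) (T : PySem.Set String)
    (h : pvClosed g T) : ∀ rid, rid < (pvRules g).length →
    (∀ x ∈ pvFilt (pvRuleAt g rid).2, x ∈ T) → (pvRuleAt g rid).1 ∈ T := by
  intro rid hrid hall
  have hmem := pvRuleAt_mem g rid hrid
  simp only [pvRules, List.mem_flatMap, List.mem_map] at hmem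
  obtain ⟨p, hp, r, hr, heq⟩ := hmem
  have hok : pvOk T p.2 = true := by
    simp only [pvOk, List.any_eq_true, List.all_eq_true]
    refine ⟨r, hr, fun s hs => ?_⟩
    by_cases hl : pvIslower s = true
    · simp [hl]
    · have hsT : s ∈ T := by
        refine hall s ?_
        rw [← heq] at *
        exact List.mem_filter.mpr ⟨by simpa [← heq] using hs, by simp [hl]⟩
      simp [PySem.Set.contains, hsT]
  have := h p hp hok
  rw [← heq]
  exact this

-- entry-level closedness from the per-rule form produced by B's worklist
theorem pvClosed_of_closedR (g : List (String × List (List String))) (S : PySem.Set String)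
    (h : ∀ rid, rid < (pvRules g).length →
      (∀ x ∈ pvFilt (pvRuleAt g rid).2, x ∈ S) → (pvRuleAt g rid).1 ∈ S) :
    pvClosed g S := by
  intro p hp hok
  simp only [pvOk, List.any_eq_true, List.all_eq_true] at hok
  obtain ⟨r, hr, hall⟩ := hok
  have hmem : (p.1, r) ∈ pvRules g := by
    simp only [pvRules, List.mem_flatMap, List.mem_map]
    exact ⟨p, hp, r, hr, rfl⟩
  obtain ⟨rid, hrid, heq⟩ := List.mem_iff_getElem.mp hmem
  have hAt : pvRuleAt g rid = (p.1, r) := by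
    unfold pvRuleAt
    rw [List.getD_eq_getElem?_getD, List.getElem?_eq_getElem hrid, heq]
    rfl
  have := h rid hrid (fun x hx => ?_)
  · rwa [hAt] at this
  · rw [hAt] at hx
    have hxr : x ∈ r := List.mem_of_mem_filter hx
    have hnl : ¬ pvIslower x = true := by
      have := List.mem_filter.mp hx
      simpa using this.2
    rcases Bool.or_eq_true _ _ |>.mp (hall x hxr) with hc | hl
    · simpa [PySem.Set.contains] using hc
    · exact absurd hl hnl

-- one worklist step: folding pvRelax over a list of rule ids
theorem pvRelaxFold (g : List (String × List (List String))) (P : List String) :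
    ∀ (l : List Nat) (counts : List Int) (S : PySem.Set String) (q : List String),
    counts.length = (pvRules g).length →
    (∀ rid, rid < (pvRules g).length →
       counts.getD rid 0 = (pvUnres P (pvRuleAt g rid).2 : Int) + (l.count rid : Int)) →
    (∀ rid ∈ l, rid < (pvRules g).length) →
    ((l.foldl (pvRelax ((pvRules g).map Prod.fst)) (counts, S, q)).1.length = (pvRules g).length ∧
     (∀ rid, rid < (pvRules g).length →
        (l.foldl (pvRelax ((pvRules g).map Prod.fst)) (counts, S, q)).1.getD rid 0
          = (pvUnres P (pvRuleAt g rid).2 : Int)) ∧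
     (∃ Δ, (l.foldl (pvRelax ((pvRules g).map Prod.fst)) (counts, S, q)).2.1 = S ++ Δ ∧
        (l.foldl (pvRelax ((pvRules g).map Prod.fst)) (counts, S, q)).2.2 = q ++ Δ ∧
        (S.Nodup → (l.foldl (pvRelax ((pvRules g).map Prod.fst)) (counts, S, q)).2.1.Nodup) ∧
        (∀ x ∈ Δ, ∃ rid, rid < (pvRules g).length ∧ x = (pvRuleAt g rid).1 ∧
           pvUnres P (pvRuleAt g rid).2 = 0)) ∧
     ((∀ rid, rid < (pvRules g).length → counts.getD rid 0 = 0 → (pvRuleAt g rid).1 ∈ S) →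
       ∀ rid, rid < (pvRules g).length →
        (l.foldl (pvRelax ((pvRules g).map Prod.fst)) (counts, S, q)).1.getD rid 0 = 0 →
        (pvRuleAt g rid).1 ∈ (l.foldl (pvRelax ((pvRules g).map Prod.fst)) (counts, S, q)).2.1)) := by
  intro l
  induction l with
  | nil =>
    intro counts S q hlen hA _
    refine ⟨hlen, fun rid h => by simpa using hA rid h, ⟨[], by simp, by simp,
      fun h => by simpa using h, by simp⟩, fun hz rid h h0 => by simpa using hz rid h h0⟩
  | cons rid0 l ih =>
    intro counts S q hlen hA hval
    have hrid0 : rid0 < (pvRules g).length := hval rid0 List.mem_cons_self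
    rw [List.foldl_cons]
    set c := counts.getD rid0 0 - 1 with hcdef
    set counts1 := counts.set rid0 c with hc1def
    set lhs := ((pvRules g).map Prod.fst).getD rid0 "" with hlhsdef
    have hlhs : lhs = (pvRuleAt g rid0).1 := pvGetD_map_fst (pvRules g) rid0
    have hlen1 : counts1.length = (pvRules g).length := by simp [hc1def, hlen]
    have hc : c = (pvUnres P (pvRuleAt g rid0).2 : Int) + (l.count rid0 : Int) := by
      have := hA rid0 hrid0
      rw [List.count_cons_self] at this
      rw [hcdef, this]
      push_cast
      ring
    have hA1 : ∀ rid, rid < (pvRules g).length →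
        counts1.getD rid 0 = (pvUnres P (pvRuleAt g rid).2 : Int) + (l.count rid : Int) := by
      intro rid hrid
      by_cases he : rid = rid0
      · subst he
        rw [hc1def, pvGetD_set_self _ _ _ (by omega), hc]
      · rw [hc1def, pvGetD_set_ne _ _ _ _ he, hA rid hrid]
        simp [Ne.symm he]
    have hu0 : c = 0 → pvUnres P (pvRuleAt g rid0).2 = 0 := by
      intro h0
      rw [hc] at h0
      omega
    have hz1 : (∀ rid, rid < (pvRules g).length → counts.getD rid 0 = 0 → (pvRuleAt g rid).1 ∈ S) →
        ∀ (S1 : List String), (∀ x ∈ S, x ∈ S1) → (c = 0 → lhs ∈ S1) →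
        ∀ rid, rid < (pvRules g).length → counts1.getD rid 0 = 0 → (pvRuleAt g rid).1 ∈ S1 := by
      intro hz S1 hSS1 hlhsS1 rid hrid h0
      by_cases he : rid = rid0
      · subst he
        rw [hc1def, pvGetD_set_self _ _ _ (by omega)] at h0
        rw [← hlhs]
        exact hlhsS1 h0
      · rw [hc1def, pvGetD_set_ne _ _ _ _ he] at h0
        exact hSS1 _ (hz rid hrid h0)
    by_cases hbr : (c == 0 && !(PySem.Set.contains S lhs)) = true
    · obtain ⟨hz, hnm⟩ := Bool.and_eq_true _ _ |>.mp hbr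
      have hc0 : c = 0 := by simpa using hz
      have hnm' : lhs ∉ S := by simpa [PySem.Set.contains] using hnm
      have hstep : pvRelax ((pvRules g).map Prod.fst) (counts, S, q) rid0 =
          (counts1, PySem.Set.add S lhs, q ++ [lhs]) := by
        simp only [pvRelax]
        rw [if_pos (by rw [← hcdef, ← hlhsdef]; exact hbr)]
      rw [hstep]
      obtain ⟨ih1, ih2, ⟨Δ, hΔ1, hΔ2, hΔnd, hΔmem⟩, ihz⟩ :=
        ih counts1 (PySem.Set.add S lhs) (q ++ [lhs]) hlen1 hA1
          (fun rid hr => hval rid (List.mem_cons_of_mem _ hr))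
      have hadd : PySem.Set.add S lhs = S ++ [lhs] := PySem.Set.add_of_not_mem hnm'
      refine ⟨ih1, ih2, ⟨lhs :: Δ, ?_, ?_, ?_, ?_⟩, ?_⟩
      · rw [hΔ1, hadd]; simp
      · rw [hΔ2]; simp
      · intro hndS
        exact hΔnd (PySem.Set.nodup_add S lhs hndS)
      · intro x hx
        rcases List.mem_cons.mp hx with rfl | hx'
        · exact ⟨rid0, hrid0, hlhs, hu0 hc0⟩
        · exact hΔmem x hx'
      · intro hz0 rid hrid h0
        refine ihz ?_ rid hrid h0
        intro rid' hrid' h0'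
        refine hz1 hz0 (PySem.Set.add S lhs) (fun x hx => (PySem.Set.mem_add S lhs x).mpr (Or.inl hx))
          (fun _ => (PySem.Set.mem_add S lhs lhs).mpr (Or.inr rfl)) rid' hrid' h0'
    · have hstep : pvRelax ((pvRules g).map Prod.fst) (counts, S, q) rid0 = (counts1, S, q) := by
        simp only [pvRelax]
        rw [if_neg (by rw [← hcdef, ← hlhsdef]; exact hbr)]
      rw [hstep]
      obtain ⟨ih1, ih2, ⟨Δ, hΔ1, hΔ2, hΔnd, hΔmem⟩, ihz⟩ :=
        ih counts1 S q hlen1 hA1 (fun rid hr => hval rid (List.mem_cons_of_mem _ hr))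
      refine ⟨ih1, ih2, ⟨Δ, hΔ1, hΔ2, hΔnd, hΔmem⟩, ?_⟩
      intro hz0 rid hrid h0
      refine ihz ?_ rid hrid h0
      have hlhsS : c = 0 → lhs ∈ S := by
        intro h0'
        by_contra hnm
        exact hbr (by simp [h0', PySem.Set.contains, hnm])
      exact hz1 hz0 S (fun x hx => hx) hlhsS

theorem pvTerminal (g : List (String × List (List String))) (popped : List String)
    (counts : List Int) (S : PySem.Set String) (hS : S = popped)
    (hcounts : pvCountsOK g popped counts) (hzero : pvZeroOK g counts S) :
    ∀ rid, rid < (pvRules g).length →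
      (∀ x ∈ pvFilt (pvRuleAt g rid).2, x ∈ S) → (pvRuleAt g rid).1 ∈ S := by
  intro rid hrid hall
  have hu : pvUnres popped (pvRuleAt g rid).2 = 0 :=
    (pvUnres_eq_zero_iff _ _).mpr (fun x hx => by rw [← hS]; exact hall x hx)
  have h0 : counts.getD rid 0 = 0 := by
    rw [hcounts.2 rid hrid, hu]
    rfl
  exact hzero rid hrid h0

theorem pvLoop_main (g : List (String × List (List String))) (occ : PySem.Dict String (List Nat))
    (_hkeys : (g.map Prod.fst).Nodup) (hocc : pvOccOK g occ) (fuel : Nat) :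
    ∀ (popped pending : List String) (counts : List Int) (S : PySem.Set String),
    S = popped ++ pending → S.Nodup → (∀ x ∈ S, x ∈ (pvRules g).map Prod.fst) →
    pvCountsOK g popped counts → pvZeroOK g counts S →
    pending.length + g.length ≤ fuel + S.length →
    (∀ x ∈ S, x ∈ pvLoopW ((pvRules g).map Prod.fst) occ fuel counts S pending) ∧
    (∀ rid, rid < (pvRules g).length →
      (∀ x ∈ pvFilt (pvRuleAt g rid).2, x ∈ pvLoopW ((pvRules g).map Prod.fst) occ fuel counts S pending) →
      (pvRuleAt g rid).1 ∈ pvLoopW ((pvRules g).map Prod.fst) occ fuel counts S pending) ∧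
    (∀ T : PySem.Set String,
      (∀ rid, rid < (pvRules g).length → (∀ x ∈ pvFilt (pvRuleAt g rid).2, x ∈ T) → (pvRuleAt g rid).1 ∈ T) →
      (∀ x ∈ S, x ∈ T) →
      ∀ x ∈ pvLoopW ((pvRules g).map Prod.fst) occ fuel counts S pending, x ∈ T) := by
  induction fuel with
  | zero =>
    intro popped pending counts S hS hnd hsub hcounts hzero hfuel
    have hsub2 : S ⊆ g.map Prod.fst := fun {x} hx => pvRules_fst_sub g x (hsub x hx)
    have hlenS : S.length ≤ g.length := by
      have := (hnd.subperm hsub2).length_le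
      simpa using this
    have hpe : pending = [] := List.length_eq_zero_iff.mp (by omega)
    subst hpe
    simp only [pvLoopW]
    have hS' : S = popped := by simpa using hS
    exact ⟨fun x hx => hx,
      fun rid hrid hall => pvTerminal g popped counts S hS' hcounts hzero rid hrid hall,
      fun T hclT hST x hx => hST x hx⟩
  | succ fuel ihf =>
    intro popped pending counts S hS hnd hsub hcounts hzero hfuel
    cases pending with
    | nil =>
      simp only [pvLoopW]
      have hS' : S = popped := by simpa using hS
      exact ⟨fun x hx => hx,
        fun rid hrid hall => pvTerminal g popped counts S hS' hcounts hzero rid hrid hall,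
        fun T hclT hST x hx => hST x hx⟩
    | cons n rest =>
      simp only [pvLoopW]
      have hnP : n ∉ popped := by
        have h3 := hnd
        rw [hS, List.nodup_append] at h3
        exact fun hmem => (h3.2.2 n hmem n List.mem_cons_self) rfl
      have hval : ∀ rid ∈ occ.getD n [], rid < (pvRules g).length := by
        intro rid hr
        by_contra hge
        have h1 : 0 < (occ.getD n []).count rid := List.count_pos_iff.mpr hr
        have h2 := hocc n rid
        rw [show pvRuleAt g rid = ("", []) from pvGetD_big _ _ _ (by omega)] at h2
        simp [pvFilt] at h2
        omega
      have hA : ∀ rid, rid < (pvRules g).length →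
          counts.getD rid 0 = (pvUnres (popped ++ [n]) (pvRuleAt g rid).2 : Int)
            + (((occ.getD n []).count rid) : Int) := by
        intro rid hrid
        rw [hcounts.2 rid hrid, pvUnres_append popped _ n hnP, ← hocc n rid]
        push_cast
        ring
      obtain ⟨hr1len, hr1, ⟨Δ, hΔ1, hΔ2, hΔnd, hΔmem⟩, hrz⟩ :=
        pvRelaxFold g (popped ++ [n]) (occ.getD n []) counts S [] hcounts.1 hA hval
      set r := (occ.getD n []).foldl (pvRelax ((pvRules g).map Prod.fst)) (counts, S, []) with hrdef
      have hq2 : r.2.2 = Δ := by simpa using hΔ2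
      have hS1 : r.2.1 = S ++ Δ := hΔ1
      obtain ⟨ih1, ih2, ih3⟩ := ihf (popped ++ [n]) (rest ++ r.2.2) r.1 r.2.1
        (by rw [hS1, hq2, hS]; simp)
        (hΔnd hnd)
        (by intro x hx
            rw [hS1] at hx
            rcases List.mem_append.mp hx with hx' | hx'
            · exact hsub x hx'
            · obtain ⟨rid, hrid, heq, _⟩ := hΔmem x hx'
              rw [heq]; exact pvRuleAt_fst_mem g rid hrid)
        ⟨hr1len, hr1⟩
        (fun rid hrid h0 => hrz hzero rid hrid h0)
        (by have h5 : (rest ++ r.2.2).length = rest.length + Δ.length := by rw [hq2]; simp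
            have h6 : r.2.1.length = S.length + Δ.length := by rw [hS1]; simp
            simp only [List.length_cons] at hfuel
            omega)
      refine ⟨?_, ih2, ?_⟩
      · intro x hx
        exact ih1 x (by rw [hS1]; exact List.mem_append_left _ hx)
      · intro T hclT hST
        refine ih3 T hclT ?_
        intro x hx
        rw [hS1] at hx
        rcases List.mem_append.mp hx with hx' | hx'
        · exact hST x hx'
        · obtain ⟨rid, hrid, heq, hu⟩ := hΔmem x hx'
          rw [heq]
          refine hclT rid hrid ?_
          intro y hy
          have hyP : y ∈ popped ++ [n] := (pvUnres_eq_zero_iff _ _).mp hu y hy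
          rcases List.mem_append.mp hyP with hyp | hyn
          · exact hST y (by rw [hS]; exact List.mem_append_left _ hyp)
          · rw [List.mem_singleton.mp hyn]
            exact hST n (by rw [hS]; exact List.mem_append_right _ List.mem_cons_self)

-- ===== VERDICT (by name: the statement is the Claim_ definition above) =====
theorem find_unproductive_non_terminals_spec : Claim_equal_find_unproductive_non_terminals := by
  intro g _hdom hpre
  have hpre' : (g.map Prod.fst).Nodup := hpre
  show find_unproductive_non_terminals g = find_unproductive_non_terminals_alt g
  obtain ⟨hblhs, hblen, hbcnt, hbocc, hbpq, hbnd, hbjust, hbzero⟩ := pvBuild_state g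
  simp only [find_unproductive_non_terminals, find_unproductive_non_terminals_alt]
  rw [pvRange_foldl_eq_iterate (pvPassA g) PySem.Set.empty g.length, hblhs]
  set Aset := (pvPassA g)^[g.length] (PySem.Set.empty : PySem.Set String) with hAdef
  set B := pvLoopW ((pvRules g).map Prod.fst) (pvBuild g).occ
      (g.length + (pvBuild g).queue.length) (pvBuild g).counts (pvBuild g).prod
      (pvBuild g).queue with hBdef
  -- A's result is a fixpoint, hence closed
  have hfix : pvPassA g Aset = Aset := pvIter_fix g
  have hACl : pvClosed g Aset := by
    intro p hp hok
    have := pvFoldA_mem g Aset p hp (Or.inr hok)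
    rwa [show g.foldl pvStepA Aset = Aset from hfix] at this
  -- B's loop: instantiate the main worklist lemma at the built state
  obtain ⟨hB1, hB2, hB3⟩ := pvLoop_main g (pvBuild g).occ hpre' (fun s rid => hbocc s rid)
    (g.length + (pvBuild g).queue.length) [] (pvBuild g).queue (pvBuild g).counts (pvBuild g).prod
    (by rw [hbpq]; simp)
    hbnd
    (by intro x hx
        obtain ⟨rid, hrid, heq, _⟩ := hbjust x hx
        rw [heq]; exact pvRuleAt_fst_mem g rid hrid)
    ⟨hblen, by intro rid hrid; unfold pvRuleAt; rw [hbcnt rid hrid, pvUnres_nil]⟩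
    (fun rid hrid h0 => hbzero rid hrid h0)
    (by omega)
  rw [← hBdef] at hB1 hB2 hB3
  have hBCl : pvClosed g B := pvClosed_of_closedR g B hB2
  -- the elements the build phase already marked are justified by empty-filter rules
  have hS0A : ∀ x ∈ (pvBuild g).prod, x ∈ Aset := by
    intro x hx
    obtain ⟨rid, hrid, heq, hfe⟩ := hbjust x hx
    rw [heq]
    refine pvClosedR_of_closed g Aset hACl rid hrid ?_
    intro y hy
    unfold pvRuleAt at hy
    rw [hfe] at hy
    cases hy
  -- the two productive sets have the same members
  have hAB : ∀ x, x ∈ Aset ↔ x ∈ B := fun x =>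
    ⟨fun hx => pvIter_min g B hBCl g.length x hx,
     fun hx => hB3 Aset (pvClosedR_of_closed g Aset hACl) hS0A x hx⟩
  -- both outputs are the key list filtered by non-membership
  rw [PySem.Set.ofList_eq_self_of_nodup _ hpre',
    PySem.Set.ofList_eq_self_of_nodup _ (hpre'.filter _)]
  show (g.map Prod.fst).filter (fun x => !(PySem.Set.contains Aset x)) = _
  refine List.filter_congr (fun x _ => ?_)
  by_cases hx : x ∈ Aset
  · simp [PySem.Set.contains, hx, (hAB x).mp hx]
  · have hx' : x ∉ B := fun h => hx ((hAB x).mpr h)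
    simp [PySem.Set.contains, hx, hx']
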